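-- pv_equiv track=rewrite | github.com/parthashirolkar/rerAI | apps/backend/src/rerai_agent/tools/development_site_lookup.py | _best_confidence
-- ===== SOURCE A (Python) =====
-- from typing import Any, Optional
--
-- def _best_confidence(evidence: list[dict[str, Any]]) -> str:
--     rank = {"none": 0, "no_match": 0, "candidate": 1, "low": 2, "medium": 3, "high": 4}
--     best = "none"
--     for item in evidence:
--         confidence = item.get("match_confidence", "candidate")
--         if rank.get(confidence, 0) > rank[best]:
--             best = confidence
--     return best
-- ===== SOURCE B (Python) =====
-- def _best_confidence(evidence):
--     present = {item.get("match_confidence", "candidate") for item in evidence}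
--     for level in ("high", "medium", "low", "candidate"):
--         if level in present:
--             return level
--     return "none"
-- ===== Notes on version B (the rewrite author's own statement) =====
-- stated objective: simpler
-- what changed: Replaces the rank-dict max-tracking scan with a prebuilt set of present confidence labels probed over a fixed descending priority ladder (high/medium/low/candidate), returning the first label present, else 'none'.
import Mathlib
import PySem

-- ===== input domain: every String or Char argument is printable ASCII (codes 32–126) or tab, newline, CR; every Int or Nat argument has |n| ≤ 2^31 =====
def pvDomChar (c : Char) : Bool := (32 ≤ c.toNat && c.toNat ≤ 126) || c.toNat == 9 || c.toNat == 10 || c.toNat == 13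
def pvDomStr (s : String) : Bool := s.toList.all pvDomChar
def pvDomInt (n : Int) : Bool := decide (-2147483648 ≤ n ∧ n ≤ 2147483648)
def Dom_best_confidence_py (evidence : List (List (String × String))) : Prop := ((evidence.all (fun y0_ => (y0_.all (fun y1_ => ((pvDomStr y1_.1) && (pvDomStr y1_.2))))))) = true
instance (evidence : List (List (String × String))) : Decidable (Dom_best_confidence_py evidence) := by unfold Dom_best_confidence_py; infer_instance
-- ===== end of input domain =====

-- B replaces A's rank-dict max-tracking scan with a set of the present confidence labels
-- probed over a fixed descending priority ladder; objective: simpler.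

-- ===== PORT A =====
-- A's literal rank dict
def pvRank : PySem.Dict String Int :=
  PySem.Dict.ofList [("none", 0), ("no_match", 0), ("candidate", 1), ("low", 2), ("medium", 3), ("high", 4)]

-- rank[best]: best starts as "none" and is only ever replaced by a key of positive rank, so it
-- is always a key of pvRank; Python's KeyError is unreachable and getD is exact here.
def best_confidence_py (evidence : List (List (String × String))) : String :=
  evidence.foldl
    (fun best item =>
      let confidence := PySem.Dict.getD (PySem.Dict.mk item) "match_confidence" "candidate"
      if PySem.Dict.getD pvRank confidence 0 > PySem.Dict.getD pvRank best 0 then confidence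
      else best)
    "none"

-- ===== PORT B =====
-- the for-loop with early return over the ladder tuple is find? over the ladder list
def best_confidence_py_alt (evidence : List (List (String × String))) : String :=
  let present : PySem.Set String :=
    PySem.Set.ofList (evidence.map (fun item => PySem.Dict.getD (PySem.Dict.mk item) "match_confidence" "candidate"))
  ((["high", "medium", "low", "candidate"] : List String).find?
      (fun level => present.contains level)).getD "none"

-- ===== PRECONDITION & SPEC =====
def Spec_best_confidence_py (evidence : List (List (String × String))) (out : String) : Prop := out = best_confidence_py_alt evidence
instance (evidence : List (List (String × String))) (out : String) : Decidable (Spec_best_confidence_py evidence out) := by unfold Spec_best_confidence_py; infer_instance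

-- ===== CLAIM (what is proved, stated in full; the proofs are below) =====
def Claim_equal_best_confidence_py : Prop := ∀ (evidence : List (List (String × String))), Dom_best_confidence_py evidence → Spec_best_confidence_py evidence (best_confidence_py evidence)

-- ===== LEMMAS AND PROOFS =====

-- effective rank rank.get(c, 0) of a confidence string
def pvE (c : String) : Int := PySem.Dict.getD pvRank c 0

-- the canonical label of each reachable rank
def pvLab (k : Int) : String :=
  if k = 1 then "candidate" else if k = 2 then "low" else if k = 3 then "medium"
  else if k = 4 then "high" else "none"

-- the maximal effective rank occurring in a list of confidence strings
def pvMaxE (cs : List String) : Int := cs.foldr (fun c m => max (pvE c) m) 0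

lemma pvE_cases (c : String) :
    pvE c = if c = "candidate" then 1 else if c = "low" then 2 else if c = "medium" then 3
      else if c = "high" then 4 else 0 := by
  have h : pvRank = (((((((PySem.Dict.empty).insert "none" 0).insert "no_match" 0).insert "candidate" 1).insert "low" 2).insert "medium" 3).insert "high" 4) := by decide
  rw [pvE, h]
  simp [PySem.Dict.getD_insert, PySem.Dict.getD_empty]
  split_ifs <;> simp_all

lemma pvE_nonneg (c : String) : 0 ≤ pvE c := by rw [pvE_cases]; split_ifs <;> omega

lemma pvE_le_four (c : String) : pvE c ≤ 4 := by rw [pvE_cases]; split_ifs <;> omega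

lemma pvLab_pvE (c : String) (h : 1 ≤ pvE c) : pvLab (pvE c) = c := by
  rw [pvE_cases] at *; unfold pvLab; split_ifs at * <;> simp_all

lemma pvMaxE_nonneg (cs : List String) : 0 ≤ pvMaxE cs := by
  induction cs with
  | nil => simp [pvMaxE]
  | cons c cs ih => simp only [pvMaxE, List.foldr] at *; omega

lemma pvE_le_maxE {c : String} {cs : List String} (h : c ∈ cs) : pvE c ≤ pvMaxE cs := by
  induction cs with
  | nil => simp at h
  | cons d cs ih =>
    rcases List.mem_cons.mp h with rfl | h
    · simp only [pvMaxE, List.foldr]; omega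
    · have := ih h; simp only [pvMaxE, List.foldr] at *; omega

lemma pvMaxE_le_four (cs : List String) : pvMaxE cs ≤ 4 := by
  induction cs with
  | nil => simp [pvMaxE]
  | cons c cs ih =>
    have := pvE_le_four c; simp only [pvMaxE, List.foldr] at *; omega

lemma pvLab_mem (cs : List String) (h : 1 ≤ pvMaxE cs) : pvLab (pvMaxE cs) ∈ cs := by
  induction cs with
  | nil => simp [pvMaxE] at h
  | cons c cs ih =>
    have hm : pvMaxE (c :: cs) = max (pvE c) (pvMaxE cs) := rfl
    rcases le_or_gt (pvE c) (pvMaxE cs) with hle | hlt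
    · have : pvMaxE (c :: cs) = pvMaxE cs := by rw [hm]; omega
      rw [this] at h ⊢
      exact List.mem_cons_of_mem _ (ih h)
    · have : pvMaxE (c :: cs) = pvE c := by rw [hm]; omega
      rw [this] at h ⊢
      rw [pvLab_pvE c h]; exact List.mem_cons_self

-- A's max-tracking fold, characterised: starting from a canonical best it lands on the
-- canonical label of the maximal effective rank seen
lemma pvFoldA (cs : List String) (b : String) (hb : pvLab (pvE b) = b) :
    cs.foldl (fun best c => if pvE c > pvE best then c else best) b
      = pvLab (max (pvE b) (pvMaxE cs)) := by
  induction cs generalizing b with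
  | nil =>
    have h0 := pvE_nonneg b
    have hmax : max (pvE b) (pvMaxE []) = pvE b := by
      simp only [pvMaxE, List.foldr]; omega
    simp only [List.foldl_nil, hmax, hb]
  | cons c cs ih =>
    have hm : pvMaxE (c :: cs) = max (pvE c) (pvMaxE cs) := rfl
    simp only [List.foldl]
    by_cases hgt : pvE c > pvE b
    · rw [if_pos hgt]
      have hc : pvLab (pvE c) = c := pvLab_pvE c (by have := pvE_nonneg b; omega)
      rw [ih c hc, hm]
      congr 1; omega
    · rw [if_neg hgt]
      rw [ih b hb, hm]
      congr 1; omega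

lemma pvContains_ofList (cs : List String) (l : String) :
    (PySem.Set.ofList cs).contains l = decide (l ∈ cs) := by
  by_cases h : l ∈ cs
  · simp only [h, decide_true]
    exact (PySem.Set.contains_iff _ _).mpr ((PySem.Set.mem_ofList _ _).mpr h)
  · simp only [h, decide_false]
    rw [← Bool.not_eq_true]
    exact fun hc => h ((PySem.Set.mem_ofList _ _).mp ((PySem.Set.contains_iff _ _).mp hc))

-- B's ladder probe, characterised the same way
lemma pvLadder (cs : List String) :
    ((["high", "medium", "low", "candidate"] : List String).find?
        (fun level => (PySem.Set.ofList cs).contains level)).getD "none" = pvLab (pvMaxE cs) := by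
  have h0 := pvMaxE_nonneg cs
  have h4 := pvMaxE_le_four cs
  have hmem : 1 ≤ pvMaxE cs → pvLab (pvMaxE cs) ∈ cs := pvLab_mem cs
  have hnot : ∀ l : String, pvMaxE cs < pvE l → l ∉ cs := by
    intro l hl hmem'
    have := pvE_le_maxE hmem'
    omega
  have hv : pvMaxE cs = 0 ∨ pvMaxE cs = 1 ∨ pvMaxE cs = 2 ∨ pvMaxE cs = 3 ∨ pvMaxE cs = 4 := by omega
  rcases hv with h | h | h | h | h <;> rw [h] <;>
    simp only [List.find?, pvContains_ofList]
  · have nh : "high" ∉ cs := hnot _ (by rw [h]; decide)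
    have nm : "medium" ∉ cs := hnot _ (by rw [h]; decide)
    have nl : "low" ∉ cs := hnot _ (by rw [h]; decide)
    have nc : "candidate" ∉ cs := hnot _ (by rw [h]; decide)
    simp [nh, nm, nl, nc, pvLab]
  · have mc : "candidate" ∈ cs := by have := hmem (by omega); rw [h] at this; simpa [pvLab] using this
    have nh : "high" ∉ cs := hnot _ (by rw [h]; decide)
    have nm : "medium" ∉ cs := hnot _ (by rw [h]; decide)
    have nl : "low" ∉ cs := hnot _ (by rw [h]; decide)
    simp [nh, nm, nl, mc, pvLab]
  · have ml : "low" ∈ cs := by have := hmem (by omega); rw [h] at this; simpa [pvLab] using this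
    have nh : "high" ∉ cs := hnot _ (by rw [h]; decide)
    have nm : "medium" ∉ cs := hnot _ (by rw [h]; decide)
    simp [nh, nm, ml, pvLab]
  · have mm : "medium" ∈ cs := by have := hmem (by omega); rw [h] at this; simpa [pvLab] using this
    have nh : "high" ∉ cs := hnot _ (by rw [h]; decide)
    simp [nh, mm, pvLab]
  · have mh : "high" ∈ cs := by have := hmem (by omega); rw [h] at this; simpa [pvLab] using this
    simp [mh, pvLab]

-- ===== VERDICT (by name: the statement is the Claim_ definition above) =====
theorem best_confidence_py_spec : Claim_equal_best_confidence_py := by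
  intro evidence _
  show best_confidence_py evidence = best_confidence_py_alt evidence
  have hA : best_confidence_py evidence =
      (evidence.map (fun item => PySem.Dict.getD (PySem.Dict.mk item) "match_confidence" "candidate")).foldl
        (fun best c => if pvE c > pvE best then c else best) "none" := by
    rw [List.foldl_map]; rfl
  have hB : best_confidence_py_alt evidence =
      ((["high", "medium", "low", "candidate"] : List String).find?
          (fun level =>
            (PySem.Set.ofList (evidence.map
              (fun item => PySem.Dict.getD (PySem.Dict.mk item) "match_confidence" "candidate"))).contains level)).getD
        "none" := rfl
  rw [hA, hB, pvFoldA _ "none" (by decide), pvLadder]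
  congr 1
  have h0 := pvMaxE_nonneg (evidence.map (fun item => PySem.Dict.getD (PySem.Dict.mk item) "match_confidence" "candidate"))
  have he : pvE "none" = 0 := by decide
  rw [he]
  omega
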